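-- pv_equiv track=rewrite | github.com/curtislb/ProjectEuler | py/common/digits.py | digit_truncations_left
-- ===== SOURCE A (Python) =====
-- from typing import Callable, Iterable, Sequence, Set, Union
--
-- def digit_truncations_left(n: int) -> Set[int]:
--     """Finds all left-to-right digit truncations of a positive base-10 integer.
--
--     Args:
--         n: A positive integer value.
--
--     Returns:
--         A set of all distinct integers that result from removing the ``d`` most
--         significant digits of ``n``, where ``d`` is any integer from 0 to the
--         number of digits in the base-10 representation of ``n``, inclusive.
--     """
--
--     truncations = set()
--
--     # prepend the digits of n from right to left to truncated
--     truncated = 0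
--     factor_10 = 1
--     while n != 0:
--         n, digit = divmod(n, 10)
--         truncated += digit * factor_10
--         truncations.add(truncated)
--         factor_10 *= 10
--
--     return truncations
-- ===== SOURCE B (Python) =====
-- def digit_truncations_left(n):
--     """Recursive: the truncations of n are its last digit together with every
--     truncation of n // 10 extended by that digit on the right."""
--     if n == 0:
--         return set()
--     last = n % 10
--     return {last} | {t * 10 + last for t in digit_truncations_left(n // 10)}
-- ===== Notes on version B (the rewrite author's own statement) =====
-- stated objective: simpler
-- what changed: B is recursive: it computes the truncation set of n // 10 and rebuilds each element as t*10 + n%10, adjoining the last digit, instead of A's iterative divmod loop with a running accumulator and power-of-ten factor; Pre_ restricts to n >= 0 because A loops forever on negative n (B's recursion also never terminates there).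
import Mathlib
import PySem

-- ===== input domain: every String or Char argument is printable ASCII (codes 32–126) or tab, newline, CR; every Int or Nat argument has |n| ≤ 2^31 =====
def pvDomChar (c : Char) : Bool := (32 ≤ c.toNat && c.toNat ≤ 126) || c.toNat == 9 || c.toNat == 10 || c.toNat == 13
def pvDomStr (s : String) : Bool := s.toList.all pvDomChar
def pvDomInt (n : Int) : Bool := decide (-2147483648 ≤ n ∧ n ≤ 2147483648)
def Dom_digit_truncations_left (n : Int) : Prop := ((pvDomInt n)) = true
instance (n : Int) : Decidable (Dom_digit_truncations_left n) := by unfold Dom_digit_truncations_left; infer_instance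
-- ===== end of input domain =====

-- B rebuilds the truncation set recursively from n // 10 (each element becomes t*10 + last digit)
-- instead of A's iterative divmod loop with a running accumulator and factor (objective: simpler).


-- ===== PORT A =====
-- while n != 0: n, digit = divmod(n, 10); truncated += digit*factor_10; add; factor_10 *= 10
-- (fuel recursion; n.natAbs + 1 exceeds the digit count for every n ≥ 0, the inputs Pre_ admits)
def pvLoopA : Nat → Int → Int → Int → PySem.Set Int → PySem.Set Int
  | 0, _, _, _, acc => acc
  | fuel+1, n, truncated, factor10, acc =>
    if n = 0 then acc
    else
      let q := PySem.Int.floordiv n 10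
      let d := PySem.Int.mod n 10
      let truncated' := truncated + d * factor10
      pvLoopA fuel q truncated' (factor10 * 10) (PySem.Set.add acc truncated')

def digit_truncations_left (n : Int) : List Int :=
  pvLoopA (n.natAbs + 1) n 0 1 PySem.Set.empty

-- ===== PORT B =====
-- if n == 0: return set(); last = n % 10; return {last} | {t*10 + last for t in rec(n // 10)}
-- (fuel recursion mirroring B's self-recursion; n.natAbs + 1 exceeds the depth for every n ≥ 0)
def pvRecB : Nat → Int → PySem.Set Int
  | 0, _ => PySem.Set.empty
  | fuel+1, n =>
    if n = 0 then PySem.Set.empty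
    else
      let last := PySem.Int.mod n 10
      let smaller := pvRecB fuel (PySem.Int.floordiv n 10)
      PySem.Set.union (PySem.Set.ofList [last])
        (PySem.Set.ofList (smaller.map (fun t => t * 10 + last)))

def digit_truncations_left_alt (n : Int) : List Int :=
  pvRecB (n.natAbs + 1) n

-- ===== PRECONDITION & SPEC =====
-- Pre_ excludes negative n, on which A's divmod loop never reaches 0 (Python A diverges there;
-- B's recursion on n // 10 never terminates there either).
def Pre_digit_truncations_left (n : Int) : Prop := 0 ≤ n
instance (n : Int) : Decidable (Pre_digit_truncations_left n) := by unfold Pre_digit_truncations_left; infer_instance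
def pvWitness_digit_truncations_left : Int := (746)

def Spec_digit_truncations_left (n : Int) (out : List Int) : Prop := out = digit_truncations_left_alt n
instance (n : Int) (out : List Int) : Decidable (Spec_digit_truncations_left n out) := by unfold Spec_digit_truncations_left; infer_instance

-- ===== CLAIM (what is proved, stated in full; the proofs are below) =====
def Claim_equal_digit_truncations_left : Prop := ∀ (n : Int), Dom_digit_truncations_left n → Pre_digit_truncations_left n → Spec_digit_truncations_left n (digit_truncations_left n)

-- ===== LEMMAS AND PROOFS =====

-- the common skeleton: the raw (duplicate-keeping) list of truncations, shortest first
def pvTrunc : Nat → Int → List Int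
  | 0, _ => []
  | fuel+1, n =>
    if n = 0 then []
    else n % 10 :: (pvTrunc fuel (n / 10)).map (fun v => v * 10 + n % 10)

theorem pv_mem_foldl_add (zs : List Int) (s : PySem.Set Int) (x : Int)
    (h : x ∈ s ∨ x ∈ zs) : x ∈ List.foldl PySem.Set.add s zs := by
  induction zs generalizing s with
  | nil => simpa using h
  | cons z zs ih =>
    apply ih
    rcases h with h | h
    · exact Or.inl ((PySem.Set.mem_add s z x).mpr (Or.inl h))
    · rcases List.mem_cons.mp h with h | h
      · exact Or.inl ((PySem.Set.mem_add s z x).mpr (Or.inr h))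
      · exact Or.inr h

theorem pv_add_mem (s : PySem.Set Int) (z : Int) (h : z ∈ s) : PySem.Set.add s z = s := by
  simp [PySem.Set.add, PySem.Set.contains, h]

theorem pv_add_not_mem (s : PySem.Set Int) (z : Int) (h : z ∉ s) :
    PySem.Set.add s z = s ++ [z] := by
  simp only [PySem.Set.add, PySem.Set.contains]
  rw [if_neg]
  simpa using h

theorem pv_foldl_add_add (u s : PySem.Set Int) (z : Int) :
    List.foldl PySem.Set.add s (PySem.Set.add u z) = PySem.Set.add (List.foldl PySem.Set.add s u) z := by
  by_cases h : z ∈ u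
  · rw [pv_add_mem u z h, pv_add_mem _ z (pv_mem_foldl_add u s z (Or.inr h))]
  · rw [pv_add_not_mem u z h, List.foldl_append]
    rfl

theorem pv_foldl_add_assoc (zs : List Int) :
    ∀ (u s : PySem.Set Int),
      List.foldl PySem.Set.add s (List.foldl PySem.Set.add u zs)
        = List.foldl PySem.Set.add (List.foldl PySem.Set.add s u) zs := by
  induction zs with
  | nil => intro u s; rfl
  | cons z zs ih =>
    intro u s
    show List.foldl PySem.Set.add s (List.foldl PySem.Set.add (PySem.Set.add u z) zs)
        = List.foldl PySem.Set.add (PySem.Set.add (List.foldl PySem.Set.add s u) z) zs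
    rw [ih (PySem.Set.add u z) s, pv_foldl_add_add u s z]

-- folding a deduplicated list into a set gives the same set as folding the raw list
theorem pv_foldl_add_ofList (zs : List Int) (s : PySem.Set Int) :
    List.foldl PySem.Set.add s (PySem.Set.ofList zs) = List.foldl PySem.Set.add s zs := by
  have := pv_foldl_add_assoc zs PySem.Set.empty s
  simpa [PySem.Set.ofList, PySem.Set.empty] using this

theorem pv_ofList_map_inj (g : Int → Int) (hg : Function.Injective g) (zs : List Int) :
    PySem.Set.ofList (zs.map g) = (PySem.Set.ofList zs).map g := by
  suffices h : ∀ (s : PySem.Set Int),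
      List.foldl PySem.Set.add (s.map g) (zs.map g) = (List.foldl PySem.Set.add s zs).map g by
    simpa [PySem.Set.ofList, PySem.Set.empty] using h []
  induction zs with
  | nil => intro s; rfl
  | cons z zs ih =>
    intro s
    have hadd : PySem.Set.add (s.map g) (g z) = (PySem.Set.add s z).map g := by
      by_cases h : z ∈ s
      · rw [pv_add_mem s z h, pv_add_mem _ _ (List.mem_map_of_mem h)]
      · have h' : g z ∉ s.map g := by
          intro hm
          rcases List.mem_map.mp hm with ⟨w, hw, hwe⟩
          exact h (hg hwe ▸ hw)
        rw [pv_add_not_mem s z h, pv_add_not_mem _ _ h']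
        simp
    show List.foldl PySem.Set.add (PySem.Set.add (s.map g) (g z)) (zs.map g)
        = (List.foldl PySem.Set.add (PySem.Set.add s z) zs).map g
    rw [hadd, ih]

theorem pv_ofList_nodup (zs : List Int) (h : zs.Nodup) : PySem.Set.ofList zs = zs := by
  suffices key : ∀ (t : List Int), t.Nodup → ∀ (s : PySem.Set Int),
      (∀ x ∈ t, x ∉ s) → List.foldl PySem.Set.add s t = s ++ t by
    simpa [PySem.Set.ofList, PySem.Set.empty] using key zs h [] (by simp)
  intro t
  induction t with
  | nil => intro _ s _; simp
  | cons z t ih =>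
    intro ht s hs
    rcases List.nodup_cons.mp ht with ⟨hz, hnd⟩
    have hforall : ∀ x ∈ t, x ∉ s ++ [z] := by
      intro x hx
      simp only [List.mem_append, List.mem_singleton]
      rintro (h1 | h2)
      · exact hs x (by simp [hx]) h1
      · exact hz (h2 ▸ hx)
    show List.foldl PySem.Set.add (PySem.Set.add s z) t = s ++ z :: t
    rw [pv_add_not_mem s z (hs z (by simp)), ih hnd (s ++ [z]) hforall]
    simp

-- A's loop realises foldl-add over pvTrunc, shifted by the running accumulator and factor
theorem pvLoopA_eq (fuel : Nat) :
    ∀ (n t f : Int) (acc : PySem.Set Int), 0 ≤ n →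
      pvLoopA fuel n t f acc
        = List.foldl PySem.Set.add acc ((pvTrunc fuel n).map (fun v => t + v * f)) := by
  induction fuel with
  | zero => intro n t f acc _; simp [pvLoopA, pvTrunc]
  | succ fuel ih =>
    intro n t f acc hn
    by_cases h0 : n = 0
    · simp [pvLoopA, pvTrunc, h0]
    · have hfd : PySem.Int.floordiv n 10 = n / 10 :=
        PySem.Int.floordiv_eq_ediv_of_pos (by omega)
      have hmd : PySem.Int.mod n 10 = n % 10 :=
        PySem.Int.mod_eq_emod_of_pos (by omega)
      have hq : 0 ≤ n / 10 := by positivity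
      show (if n = 0 then acc else _) = _
      rw [if_neg h0]
      simp only [hfd, hmd]
      rw [ih (n / 10) (t + n % 10 * f) (f * 10) _ hq]
      simp only [pvTrunc, if_neg h0, List.map_cons, List.foldl_cons, List.map_map]
      congr 1
      apply List.map_congr_left
      intro v _
      simp only [Function.comp_apply]
      ring

-- B's recursion also realises pvTrunc, as a deduplicating ofList
theorem pvRecB_eq (fuel : Nat) :
    ∀ (n : Int), 0 ≤ n → pvRecB fuel n = PySem.Set.ofList (pvTrunc fuel n) := by
  induction fuel with
  | zero => intro n _; simp [pvRecB, pvTrunc, PySem.Set.ofList, PySem.Set.empty]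
  | succ fuel ih =>
    intro n hn
    by_cases h0 : n = 0
    · simp [pvRecB, pvTrunc, h0, PySem.Set.ofList, PySem.Set.empty]
    · have hfd : PySem.Int.floordiv n 10 = n / 10 :=
        PySem.Int.floordiv_eq_ediv_of_pos (by omega)
      have hmd : PySem.Int.mod n 10 = n % 10 :=
        PySem.Int.mod_eq_emod_of_pos (by omega)
      have hq : 0 ≤ n / 10 := by positivity
      have hg : Function.Injective (fun t : Int => t * 10 + n % 10) := by
        intro a b hab; simp only at hab; omega
      show (if n = 0 then PySem.Set.empty else _) = _
      rw [if_neg h0]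
      simp only [hfd, hmd, ih (n / 10) hq]
      have hmap : PySem.Set.ofList ((PySem.Set.ofList (pvTrunc fuel (n / 10))).map
            (fun t => t * 10 + n % 10))
          = PySem.Set.ofList ((pvTrunc fuel (n / 10)).map (fun t => t * 10 + n % 10)) := by
        rw [pv_ofList_map_inj _ hg, pv_ofList_map_inj _ hg,
            pv_ofList_nodup _ (PySem.Set.nodup_ofList _)]
      rw [hmap]
      have hsingle : PySem.Set.ofList [n % 10] = PySem.Set.add PySem.Set.empty (n % 10) := rfl
      show PySem.Set.union (PySem.Set.ofList [n % 10])
          (PySem.Set.ofList ((pvTrunc fuel (n / 10)).map (fun t => t * 10 + n % 10)))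
        = PySem.Set.ofList (pvTrunc (fuel + 1) n)
      have hrhs : PySem.Set.ofList (pvTrunc (fuel + 1) n)
          = List.foldl PySem.Set.add (PySem.Set.add PySem.Set.empty (n % 10))
              ((pvTrunc fuel (n / 10)).map (fun t => t * 10 + n % 10)) := by
        simp [PySem.Set.ofList, pvTrunc, if_neg h0]
      rw [hrhs, PySem.Set.union, PySem.Set.update, pv_foldl_add_ofList, hsingle]

-- ===== VERDICT (by name: the statement is the Claim_ definition above) =====
theorem digit_truncations_left_spec : Claim_equal_digit_truncations_left := by
  intro n _ hpre
  unfold Spec_digit_truncations_left digit_truncations_left digit_truncations_left_alt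
  have hpre' : (0:Int) ≤ n := hpre
  rw [pvLoopA_eq (n.natAbs + 1) n 0 1 PySem.Set.empty hpre',
      pvRecB_eq (n.natAbs + 1) n hpre']
  simp [PySem.Set.ofList]
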